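-- pv_equiv track=rewrite | github.com/ranking-agent/AnswerCoalesce | src/single_node_coalescer.py | has_unique_nodes
-- ===== SOURCE A (Python) =====
-- def has_unique_nodes(result):
--     """Given a result, return True if all nodes are unique, False otherwise"""
--     seen = set()
--     for qnode, knodes in result["node_bindings"].items():
--         knode_ids = frozenset([knode["id"] for knode in knodes])
--         if knode_ids in seen:
--             return False
--         seen.add(knode_ids)
--     return True
-- ===== SOURCE B (Python) =====
-- def has_unique_nodes(result):
--     """Given a result, return True if all nodes are unique, False otherwise"""
--     sets = [frozenset(knode["id"] for knode in knodes)
--             for knodes in result["node_bindings"].values()]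
--
--     def distinct(ss):
--         if not ss:
--             return True
--         head, tail = ss[0], ss[1:]
--         return all(head != t for t in tail) and distinct(tail)
--
--     return distinct(sets)
-- ===== Notes on version B (the rewrite author's own statement) =====
-- stated objective: alternative
-- what changed: B replaces A's single pass with an incrementally maintained hash set of seen frozensets (early return on the first duplicate found backwards) by a recursive brute-force pairwise check: materialize all frozensets, then recurse head/tail, comparing each head against every later element with all(head != t for t in tail); no auxiliary seen structure, no hashing. Pre_ excludes inputs with a knode lacking an 'id' key (B's full materialization raises KeyError there, while A can return False by early exit before reaching it) and inputs missing 'node_bindings' (both raise).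
-- outside the precondition, e.g. on has_unique_nodes({'node_bindings': {'a': [], 'b': [], 'c': [{'x': '1'}]}}): A returns False, B raises KeyError
import Mathlib
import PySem

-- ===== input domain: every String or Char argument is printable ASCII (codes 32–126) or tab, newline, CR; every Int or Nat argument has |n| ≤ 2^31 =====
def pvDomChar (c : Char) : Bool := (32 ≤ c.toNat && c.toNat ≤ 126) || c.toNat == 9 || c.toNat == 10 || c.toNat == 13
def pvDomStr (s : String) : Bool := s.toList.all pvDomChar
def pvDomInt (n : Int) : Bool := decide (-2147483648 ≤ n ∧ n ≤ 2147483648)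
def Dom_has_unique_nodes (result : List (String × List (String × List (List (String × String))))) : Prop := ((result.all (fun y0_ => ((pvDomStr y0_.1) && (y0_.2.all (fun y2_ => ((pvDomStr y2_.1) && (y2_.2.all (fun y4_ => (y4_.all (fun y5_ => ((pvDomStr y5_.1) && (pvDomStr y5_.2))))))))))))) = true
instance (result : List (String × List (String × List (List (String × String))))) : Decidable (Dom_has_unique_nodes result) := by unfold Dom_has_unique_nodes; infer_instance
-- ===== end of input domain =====

-- B replaces A's iterative hash-set-of-seen-frozensets pass (early return on first duplicate)
-- by a recursive brute-force pairwise check: materialize all frozensets, then recurse head/tail,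
-- comparing each head against every later element; no seen structure (alternative decomposition).

-- shared helpers: knode["id"] lookup (total form; Pre_ guarantees the key is present)
def pvGetId (kn : List (String × String)) : String := (PySem.Dict.mk kn).getD "id" ""
-- frozenset equality on id lists: same elements regardless of order/multiplicity (exact for frozenset ==)
-- (compares via toList: String equality ↔ equality of the char lists; kernel-friendly)
def pvSetEq (a b : List String) : Bool :=
  (a.all fun x => b.any fun y => x.toList == y.toList) &&
  (b.all fun x => a.any fun y => x.toList == y.toList)

-- ===== PORT A =====
def hunLoop : List (String × List (List (String × String))) → List (List String) → Bool
  | [], _ => true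
  | (_, knodes) :: rest, seen =>
    let knode_ids := knodes.map pvGetId
    if seen.any (pvSetEq knode_ids) then false
    else hunLoop rest (seen ++ [knode_ids])

def has_unique_nodes (result : List (String × List (String × List (List (String × String))))) : Bool :=
  hunLoop ((PySem.Dict.mk result).getD "node_bindings" []) []

-- ===== PORT B =====
-- Source B's recursive `distinct`: head compared (frozenset ==) with every later element, then recurse
def pvDistinct : List (List String) → Bool
  | [] => true
  | head :: tail => tail.all (fun t => !pvSetEq head t) && pvDistinct tail

def has_unique_nodes_alt (result : List (String × List (String × List (List (String × String))))) : Bool :=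
  let sets := ((PySem.Dict.mk result).getD "node_bindings" []).map (fun p => p.2.map pvGetId)
  pvDistinct sets

-- ===== PRECONDITION & SPEC =====
-- Pre_ excludes inputs where "node_bindings" is missing (A raises KeyError) and inputs where some
-- knode lacks an "id" key: there B always raises KeyError, and A either raises KeyError or — only
-- when an earlier duplicate triggers its early return — returns False (see claim cites).
def Pre_has_unique_nodes (result : List (String × List (String × List (List (String × String))))) : Prop :=
  (match result.find? (fun p => p.1.toList == "node_bindings".toList) with
   | some p => p.2.all (fun q => q.2.all (fun kn => kn.any (fun r => r.1.toList == "id".toList)))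
   | none => false) = true
instance (result : List (String × List (String × List (List (String × String))))) : Decidable (Pre_has_unique_nodes result) := by unfold Pre_has_unique_nodes; infer_instance

def pvWitness_has_unique_nodes : (List (String × List (String × List (List (String × String))))) :=
  [("node_bindings", [("n0", [[("id", "A")]]), ("n1", [[("id", "B")]])])]

def Spec_has_unique_nodes (result : List (String × List (String × List (List (String × String))))) (out : Bool) : Prop := out = has_unique_nodes_alt result
instance (result : List (String × List (String × List (List (String × String))))) (out : Bool) : Decidable (Spec_has_unique_nodes result out) := by unfold Spec_has_unique_nodes; infer_instance

-- ===== CLAIM (what is proved, stated in full; the proofs are below) =====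
def Claim_equal_has_unique_nodes : Prop := ∀ (result : List (String × List (String × List (List (String × String))))), Dom_has_unique_nodes result → Pre_has_unique_nodes result → Spec_has_unique_nodes result (has_unique_nodes result)

-- ===== LEMMAS AND PROOFS =====

theorem pvAllAnd {α : Type} (l : List α) (p q : α → Bool) :
    (l.all fun a => p a && q a) = (l.all p && l.all q) := by
  induction l with
  | nil => simp
  | cons a l ih => simp only [List.all_cons, ih]; ac_rfl

theorem pvSetEq_symm (a b : List String) : pvSetEq a b = pvSetEq b a := by
  unfold pvSetEq; exact Bool.and_comm _ _

-- A's loop from `seen` succeeds iff no element clashes with `seen` and the rest is pairwise distinct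
theorem hunLoop_eq (l : List (String × List (List (String × String)))) :
    ∀ seen : List (List String),
      hunLoop l seen =
        (((l.map (fun p => p.2.map pvGetId)).all
            (fun y => !seen.any (pvSetEq y))) &&
          pvDistinct (l.map (fun p => p.2.map pvGetId))) := by
  induction l with
  | nil => intro seen; simp [hunLoop, pvDistinct]
  | cons hd tl ih =>
    intro seen
    obtain ⟨q, knodes⟩ := hd
    simp only [hunLoop, List.map_cons, List.all_cons, pvDistinct]
    by_cases h : seen.any (pvSetEq (knodes.map pvGetId)) = true
    · simp [h]
    · simp only [Bool.not_eq_true] at h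
      rw [ih (seen ++ [knodes.map pvGetId])]
      have hth : ∀ y, (seen ++ [knodes.map pvGetId]).any (pvSetEq y)
            = (seen.any (pvSetEq y) || pvSetEq (knodes.map pvGetId) y) := by
        intro y; simp [List.any_append, pvSetEq_symm y]
      simp only [hth, Bool.not_or, pvAllAnd, h, Bool.false_eq_true, if_false,
        Bool.not_false, Bool.true_and]
      ac_rfl

-- ===== VERDICT (by name: the statement is the Claim_ definition above) =====
theorem has_unique_nodes_spec : Claim_equal_has_unique_nodes := by
  intro result _ _
  unfold Spec_has_unique_nodes has_unique_nodes has_unique_nodes_alt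
  rw [hunLoop_eq]
  simp
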